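-- pv_equiv track=rewrite | github.com/Asyamdaff/HckRnk-Solutions | Maximum-Cost-of-Laptop-Count.py | maxCost
-- ===== SOURCE A (Python) =====
-- def maxCost(cost, labels, dailyCount):
--     # Write your code here
--
--     mx_cost = 0
--     produced = 0
--     daily_cost = 0
--     for c, l in zip(cost, labels):
--         daily_cost += c
--         if l == "legal":
--             produced += 1
--
--         if produced == dailyCount:
--             mx_cost = max(mx_cost, daily_cost)
--             daily_cost = 0
--             produced = 0
--
--     return mx_cost
-- ===== SOURCE B (Python) =====
-- def maxCost(cost, labels, dailyCount):
--     # Repeatedly carve off the first completed day (the shortest prefix whose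
--     # running legal-count hits dailyCount) and take the max of segment sums.
--     def next_segment(items):
--         total = 0
--         count = 0
--         for i, (c, l) in enumerate(items):
--             total += c
--             if l == "legal":
--                 count += 1
--             if count == dailyCount:
--                 return total, items[i + 1:]
--         return None
--
--     best = 0
--     seg = next_segment(list(zip(cost, labels)))
--     while seg is not None:
--         best = max(best, seg[0])
--         seg = next_segment(seg[1])
--     return best
-- ===== Notes on version B (the rewrite author's own statement) =====
-- stated objective: alternative
-- what changed: A runs one pass with a three-field mutable state (max, produced, daily_cost) reset in place; B instead repeatedly extracts the first completed day as a (sum, remainder) pair via a helper and folds max over those segment sums, with no reset logic.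
import Mathlib
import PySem

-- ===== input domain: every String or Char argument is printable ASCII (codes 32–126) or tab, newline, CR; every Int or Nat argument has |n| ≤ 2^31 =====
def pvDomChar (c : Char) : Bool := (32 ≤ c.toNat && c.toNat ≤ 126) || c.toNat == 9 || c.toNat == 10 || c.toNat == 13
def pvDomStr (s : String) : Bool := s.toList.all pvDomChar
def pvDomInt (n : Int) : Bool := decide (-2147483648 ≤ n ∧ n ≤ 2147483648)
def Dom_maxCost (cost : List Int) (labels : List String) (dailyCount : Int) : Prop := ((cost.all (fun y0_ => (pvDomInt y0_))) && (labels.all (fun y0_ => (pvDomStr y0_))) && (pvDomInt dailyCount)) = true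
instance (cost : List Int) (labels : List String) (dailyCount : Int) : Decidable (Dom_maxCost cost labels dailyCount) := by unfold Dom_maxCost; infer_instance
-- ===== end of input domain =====

-- B restates A's one-pass state machine as repeated extraction of the first completed
-- segment (objective: alternative decomposition, same behaviour on all inputs).

-- ===== PORT A =====
-- state = (mx_cost, produced, daily_cost), exactly A's loop over zip(cost, labels)
def maxCost (cost : List Int) (labels : List String) (dailyCount : Int) : Int :=
  ((List.zip cost labels).foldl
    (fun (st : Int × Int × Int) cl =>
      let daily_cost := st.2.2 + cl.1
      let produced := if cl.2 == "legal" then st.2.1 + 1 else st.2.1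
      if produced == dailyCount then (max st.1 daily_cost, (0 : Int), (0 : Int))
      else (st.1, produced, daily_cost))
    (0, 0, 0)).1

-- ===== PORT B =====
-- Source B's next_segment: walk the items accumulating total and legal count; when the
-- count hits dailyCount return (total, remaining items); the head/tail recursion is
-- the Lean form of the Python loop over enumerate with the slice items[i+1:].
def nextSegment (d : Int) : List (Int × String) → Int → Int → Option (Int × List (Int × String))
  | [], _, _ => none
  | (c, l) :: t, total, count =>
    let total' := total + c
    let count' := if l == "legal" then count + 1 else count
    if count' == d then some (total', t) else nextSegment d t total' count'

theorem nextSegment_lt (d : Int) : ∀ (items : List (Int × String)) (t c s : Int)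
    (rest : List (Int × String)), nextSegment d items t c = some (s, rest) →
    rest.length < items.length := by
  intro items
  induction items with
  | nil => intro t c s rest h; simp [nextSegment] at h
  | cons hd tl ih =>
    intro t c s rest h
    obtain ⟨hc, hl⟩ := hd
    simp only [nextSegment] at h
    split at h <;> split at h <;>
      first
        | (simp only [Option.some.injEq, Prod.mk.injEq] at h
           obtain ⟨-, h2⟩ := h
           subst h2
           simp)
        | (exact Nat.lt_succ_of_lt (ih _ _ s rest h))
-- Source B's while-loop over successive segments, taking max of segment sums
def segLoop (d : Int) (items : List (Int × String)) (best : Int) : Int :=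
  match h : nextSegment d items 0 0 with
  | none => best
  | some (s, rest) => segLoop d rest (max best s)
termination_by items.length
decreasing_by exact nextSegment_lt d items 0 0 s rest h

def maxCost_alt (cost : List Int) (labels : List String) (dailyCount : Int) : Int :=
  segLoop dailyCount (List.zip cost labels) 0

-- ===== PRECONDITION & SPEC =====
def Spec_maxCost (cost : List Int) (labels : List String) (dailyCount : Int) (out : Int) : Prop := out = maxCost_alt cost labels dailyCount
instance (cost : List Int) (labels : List String) (dailyCount : Int) (out : Int) : Decidable (Spec_maxCost cost labels dailyCount out) := by unfold Spec_maxCost; infer_instance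

-- ===== CLAIM (what is proved, stated in full; the proofs are below) =====
def Claim_equal_maxCost : Prop := ∀ (cost : List Int) (labels : List String) (dailyCount : Int), Dom_maxCost cost labels dailyCount → Spec_maxCost cost labels dailyCount (maxCost cost labels dailyCount)

-- ===== LEMMAS AND PROOFS =====

theorem segLoop_eq (d : Int) (items : List (Int × String)) (best : Int) :
    segLoop d items best =
      match nextSegment d items 0 0 with
      | none => best
      | some (s, rest) => segLoop d rest (max best s) := by
  rw [segLoop]
  split
  · rename_i h; rw [h]
  · rename_i s rest h2; rw [h2]

theorem fold_eq_seg (d : Int) : ∀ (items : List (Int × String)) (mx p dc : Int),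
    ((items.foldl
      (fun (st : Int × Int × Int) cl =>
        let daily_cost := st.2.2 + cl.1
        let produced := if cl.2 == "legal" then st.2.1 + 1 else st.2.1
        if produced == d then (max st.1 daily_cost, (0 : Int), (0 : Int))
        else (st.1, produced, daily_cost))
      (mx, p, dc)).1) =
    (match nextSegment d items dc p with
     | none => mx
     | some (s, rest) => segLoop d rest (max mx s)) := by
  intro items
  induction items with
  | nil => intro mx p dc; simp [nextSegment]
  | cons hd tl ih =>
    intro mx p dc
    obtain ⟨c, l⟩ := hd
    simp only [List.foldl_cons, nextSegment]
    by_cases hfire : ((if l == "legal" then p + 1 else p) == d) = true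
    · simp only [hfire, if_true]
      rw [ih, segLoop_eq d tl]
    · simp only [Bool.not_eq_true] at hfire
      simp only [hfire, Bool.false_eq_true, if_false]
      rw [ih]

-- ===== VERDICT (by name: the statement is the Claim_ definition above) =====
theorem maxCost_spec : Claim_equal_maxCost := by
  intro cost labels dailyCount _
  unfold Spec_maxCost maxCost maxCost_alt
  rw [fold_eq_seg, segLoop_eq]
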